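-- pv_equiv track=rewrite | github.com/LeadingThink/CodeTranslate | src/codetranslate/analysis/adapters/java_adapter.py | _detect_frameworks
-- ===== SOURCE A (Python) =====
-- def _detect_frameworks(source: str, annotations: set[str]) -> set[str]:
--     frameworks: set[str] = set()
--     if {
--         "SpringBootApplication",
--         "Service",
--         "Repository",
--         "RestController",
--         "Autowired",
--     }.intersection(annotations) or "org.springframework" in source:
--         frameworks.add("spring")
--     if (
--         "javax.persistence" in source
--         or "jakarta.persistence" in source
--         or "Entity" in annotations
--     ):
--         frameworks.add("jpa")
--     if "Mapper" in annotations or "org.apache.ibatis" in source: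
--         frameworks.add("mybatis")
--     if "lombok" in source or annotations.intersection({"Data", "Builder", "Value"}):
--         frameworks.add("lombok")
--     if "reactor.core" in source or any(token in source for token in ["Mono<", "Flux<"]):
--         frameworks.add("reactor")
--     return frameworks
-- ===== SOURCE B (Python) =====
-- # Inverted-index detection: map each trigger annotation to its framework, scan the
-- # annotations once through that index, scan a flat (substring, framework) pair list
-- # once against the source, then emit hits in canonical framework order.
-- _ANNO_INDEX = {
--     "SpringBootApplication": "spring",
--     "Service": "spring",
--     "Repository": "spring",
--     "RestController": "spring",
--     "Autowired": "spring",
--     "Entity": "jpa",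
--     "Mapper": "mybatis",
--     "Data": "lombok",
--     "Builder": "lombok",
--     "Value": "lombok",
-- }
--
-- _SUB_PAIRS = [
--     ("org.springframework", "spring"),
--     ("javax.persistence", "jpa"),
--     ("jakarta.persistence", "jpa"),
--     ("org.apache.ibatis", "mybatis"),
--     ("lombok", "lombok"),
--     ("reactor.core", "reactor"),
--     ("Mono<", "reactor"),
--     ("Flux<", "reactor"),
-- ]
--
-- _ORDER = ["spring", "jpa", "mybatis", "lombok", "reactor"]
--
--
-- def _detect_frameworks(source: str, annotations: set[str]) -> set[str]:
--     hits = {_ANNO_INDEX[a] for a in annotations if a in _ANNO_INDEX}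
--     hits.update(fw for sub, fw in _SUB_PAIRS if sub in source)
--     return {fw for fw in _ORDER if fw in hits}
-- ===== Notes on version B (the rewrite author's own statement) =====
-- stated objective: alternative
-- what changed: Inverts the traversal: instead of testing each framework's conditions in turn, B scans the annotations once through an inverted index (annotation -> framework), scans a flat (substring, framework) pair list once against the source, and emits the accumulated hit set in canonical framework order.
import Mathlib
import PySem

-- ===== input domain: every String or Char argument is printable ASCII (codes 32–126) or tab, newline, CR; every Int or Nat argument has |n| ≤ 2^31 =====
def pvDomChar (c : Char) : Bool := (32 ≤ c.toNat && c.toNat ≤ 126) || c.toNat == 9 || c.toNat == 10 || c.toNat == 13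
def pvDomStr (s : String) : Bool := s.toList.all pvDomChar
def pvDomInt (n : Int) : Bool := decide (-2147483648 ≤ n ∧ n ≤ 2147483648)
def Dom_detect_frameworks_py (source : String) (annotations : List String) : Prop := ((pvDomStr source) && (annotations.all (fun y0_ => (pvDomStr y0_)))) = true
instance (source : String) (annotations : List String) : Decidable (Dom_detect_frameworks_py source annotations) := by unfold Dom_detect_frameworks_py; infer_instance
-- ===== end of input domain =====

-- B inverts the traversal: one scan of the annotations through an inverted index (annotation -> framework)
-- plus one scan of a flat (substring, framework) pair list, emitting hits in canonical order (objective: alternative).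


-- ===== PORT A =====
-- Port of A: five independent `if` tests, each adding its framework name to the set.
def detect_frameworks_py (source : String) (annotations : List String) : List String :=
  let frameworks : PySem.Set String := PySem.Set.empty
  let frameworks :=
    if (!(PySem.Set.inter (PySem.Set.ofList ["SpringBootApplication", "Service", "Repository", "RestController", "Autowired"]) annotations).isEmpty)
        || PySem.Str.isIn "org.springframework" source
    then PySem.Set.add frameworks "spring" else frameworks
  let frameworks :=
    if PySem.Str.isIn "javax.persistence" source
        || PySem.Str.isIn "jakarta.persistence" source
        || PySem.Set.contains annotations "Entity"
    then PySem.Set.add frameworks "jpa" else frameworks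
  let frameworks :=
    if PySem.Set.contains annotations "Mapper" || PySem.Str.isIn "org.apache.ibatis" source
    then PySem.Set.add frameworks "mybatis" else frameworks
  let frameworks :=
    if PySem.Str.isIn "lombok" source
        || (!(PySem.Set.inter annotations (PySem.Set.ofList ["Data", "Builder", "Value"])).isEmpty)
    then PySem.Set.add frameworks "lombok" else frameworks
  let frameworks :=
    if PySem.Str.isIn "reactor.core" source
        || (["Mono<", "Flux<"].any fun token => PySem.Str.isIn token source)
    then PySem.Set.add frameworks "reactor" else frameworks
  frameworks

-- ===== PORT B =====
-- B: inverted index annotation -> framework; flat (substring, framework) pair list; canonical output order.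
def pvAnnoIndex : PySem.Dict String String := PySem.Dict.ofList
  [("SpringBootApplication", "spring"), ("Service", "spring"), ("Repository", "spring"),
   ("RestController", "spring"), ("Autowired", "spring"),
   ("Entity", "jpa"), ("Mapper", "mybatis"),
   ("Data", "lombok"), ("Builder", "lombok"), ("Value", "lombok")]

def pvSubPairs : List (String × String) :=
  [("org.springframework", "spring"), ("javax.persistence", "jpa"), ("jakarta.persistence", "jpa"),
   ("org.apache.ibatis", "mybatis"), ("lombok", "lombok"),
   ("reactor.core", "reactor"), ("Mono<", "reactor"), ("Flux<", "reactor")]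

def pvOrder : List String := ["spring", "jpa", "mybatis", "lombok", "reactor"]

-- hits = {_ANNO_INDEX[a] for a in annotations if a in _ANNO_INDEX}; hits.update(fw for sub, fw in _SUB_PAIRS if sub in source)
def pvHits (source : String) (annotations : List String) : PySem.Set String :=
  let hits : PySem.Set String := annotations.foldl (fun h a =>
    match PySem.Dict.get? pvAnnoIndex a with
    | some fw => PySem.Set.add h fw
    | none => h) PySem.Set.empty
  pvSubPairs.foldl (fun h p =>
    if PySem.Str.isIn p.1 source then PySem.Set.add h p.2 else h) hits

def detect_frameworks_py_alt (source : String) (annotations : List String) : List String :=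
  -- {fw for fw in _ORDER if fw in hits}: _ORDER's elements are distinct, so this set is the filter
  pvOrder.filter (fun fw => PySem.Set.contains (pvHits source annotations) fw)

-- ===== PRECONDITION & SPEC =====
def Spec_detect_frameworks_py (source : String) (annotations : List String) (out : List String) : Prop := out = detect_frameworks_py_alt source annotations
instance (source : String) (annotations : List String) (out : List String) : Decidable (Spec_detect_frameworks_py source annotations out) := by unfold Spec_detect_frameworks_py; infer_instance

-- ===== CLAIM (what is proved, stated in full; the proofs are below) =====
def Claim_equal_detect_frameworks_py : Prop := ∀ (source : String) (annotations : List String), Dom_detect_frameworks_py source annotations → Spec_detect_frameworks_py source annotations (detect_frameworks_py source annotations)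

-- ===== LEMMAS AND PROOFS =====

-- B's annotation scan: membership in the fold = initial membership or some annotation maps to fw
lemma contains_annoFold (l : List String) (init : PySem.Set String) (fw : String) :
    PySem.Set.contains (l.foldl (fun h a =>
      match PySem.Dict.get? pvAnnoIndex a with
      | some f => PySem.Set.add h f
      | none => h) init) fw
    = (PySem.Set.contains init fw || l.any (fun a => PySem.Dict.get? pvAnnoIndex a == some fw)) := by
  induction l generalizing init with
  | nil => simp
  | cons a l ih =>
    simp only [List.foldl_cons, List.any_cons, ih]
    cases h : PySem.Dict.get? pvAnnoIndex a with
    | none => simp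
    | some f =>
      rw [Bool.eq_iff_iff]
      simp [PySem.Set.mem_add]
      tauto

-- B's substring scan: membership in the fold = initial membership or some matching pair names fw
lemma contains_subFold (source : String) (pairs : List (String × String)) (init : PySem.Set String) (fw : String) :
    PySem.Set.contains (pairs.foldl (fun h p =>
      if PySem.Str.isIn p.1 source then PySem.Set.add h p.2 else h) init) fw
    = (PySem.Set.contains init fw || pairs.any (fun p => PySem.Str.isIn p.1 source && p.2 == fw)) := by
  induction pairs generalizing init with
  | nil => simp
  | cons p l ih =>
    by_cases hp : PySem.Str.isIn p.1 source
    · simp only [List.foldl_cons, List.any_cons, ih, hp, if_true, Bool.true_and]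
      rw [Bool.eq_iff_iff]
      simp [PySem.Set.mem_add]
      tauto
    · have hf : PySem.Str.isIn p.1 source = false := by simpa using hp
      simp only [List.foldl_cons, List.any_cons, ih]
      rw [if_neg hp, hf]
      simp

-- lookups in the literal inverted index, characterised as membership in its pair list
lemma get?_annoIndex (a fw : String) :
    PySem.Dict.get? pvAnnoIndex a = some fw ↔ (a, fw) ∈
      [("SpringBootApplication", "spring"), ("Service", "spring"), ("Repository", "spring"),
       ("RestController", "spring"), ("Autowired", "spring"),
       ("Entity", "jpa"), ("Mapper", "mybatis"),
       ("Data", "lombok"), ("Builder", "lombok"), ("Value", "lombok")] := by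
  have h := PySem.Dict.get?_eq_some_iff_mem_items pvAnnoIndex a fw (by decide)
  rw [h]; rfl

-- per-framework: B's annotation-scan condition equals A's annotation test
lemma anno_spring (l : List String) :
    (l.any fun a => PySem.Dict.get? pvAnnoIndex a == some "spring")
    = (!(PySem.Set.inter (PySem.Set.ofList ["SpringBootApplication", "Service", "Repository", "RestController", "Autowired"]) l).isEmpty) := by
  rw [Bool.eq_iff_iff]
  simp [List.any_eq_true, get?_annoIndex, PySem.Set.inter, PySem.Set.ofList, Prod.ext_iff]
  constructor
  · rintro ⟨x, hx, rfl | rfl | rfl | rfl | rfl⟩ <;> tauto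
  · intro h
    by_cases h1 : "SpringBootApplication" ∈ l
    · exact ⟨_, h1, by tauto⟩
    by_cases h2 : "Service" ∈ l
    · exact ⟨_, h2, by tauto⟩
    by_cases h3 : "Repository" ∈ l
    · exact ⟨_, h3, by tauto⟩
    by_cases h4 : "RestController" ∈ l
    · exact ⟨_, h4, by tauto⟩
    exact ⟨_, h h1 h2 h3 h4, by tauto⟩

lemma anno_jpa (l : List String) :
    (l.any fun a => PySem.Dict.get? pvAnnoIndex a == some "jpa") = PySem.Set.contains l "Entity" := by
  rw [Bool.eq_iff_iff]
  simp [List.any_eq_true, get?_annoIndex, Prod.ext_iff]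

lemma anno_mybatis (l : List String) :
    (l.any fun a => PySem.Dict.get? pvAnnoIndex a == some "mybatis") = PySem.Set.contains l "Mapper" := by
  rw [Bool.eq_iff_iff]
  simp [List.any_eq_true, get?_annoIndex, Prod.ext_iff]

lemma anno_lombok (l : List String) :
    (l.any fun a => PySem.Dict.get? pvAnnoIndex a == some "lombok")
    = (!(PySem.Set.inter l (PySem.Set.ofList ["Data", "Builder", "Value"])).isEmpty) := by
  rw [Bool.eq_iff_iff]
  simp [List.any_eq_true, get?_annoIndex, PySem.Set.inter, PySem.Set.ofList, Prod.ext_iff]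
  constructor
  · rintro ⟨x, hx, rfl | rfl | rfl⟩ <;> exact ⟨_, hx, by tauto⟩
  · rintro ⟨x, hx, h⟩
    exact ⟨x, hx, by tauto⟩

lemma anno_reactor (l : List String) :
    (l.any fun a => PySem.Dict.get? pvAnnoIndex a == some "reactor") = false := by
  simp [get?_annoIndex, Prod.ext_iff]

-- per-framework: membership of each name in B's hit set equals A's condition for that name
lemma hits_spring (source : String) (annotations : List String) :
    PySem.Set.contains (pvHits source annotations) "spring"
    = ((!(PySem.Set.inter (PySem.Set.ofList ["SpringBootApplication", "Service", "Repository", "RestController", "Autowired"]) annotations).isEmpty)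
        || PySem.Str.isIn "org.springframework" source) := by
  unfold pvHits pvSubPairs
  rw [contains_subFold, contains_annoFold, anno_spring]
  simp

lemma hits_jpa (source : String) (annotations : List String) :
    PySem.Set.contains (pvHits source annotations) "jpa"
    = (PySem.Str.isIn "javax.persistence" source
        || PySem.Str.isIn "jakarta.persistence" source
        || PySem.Set.contains annotations "Entity") := by
  unfold pvHits pvSubPairs
  rw [contains_subFold, contains_annoFold, anno_jpa]
  rw [Bool.eq_iff_iff]
  simp
  try tauto

lemma hits_mybatis (source : String) (annotations : List String) :
    PySem.Set.contains (pvHits source annotations) "mybatis"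
    = (PySem.Set.contains annotations "Mapper" || PySem.Str.isIn "org.apache.ibatis" source) := by
  unfold pvHits pvSubPairs
  rw [contains_subFold, contains_annoFold, anno_mybatis]
  simp

lemma hits_lombok (source : String) (annotations : List String) :
    PySem.Set.contains (pvHits source annotations) "lombok"
    = (PySem.Str.isIn "lombok" source
        || (!(PySem.Set.inter annotations (PySem.Set.ofList ["Data", "Builder", "Value"])).isEmpty)) := by
  unfold pvHits pvSubPairs
  rw [contains_subFold, contains_annoFold, anno_lombok]
  rw [Bool.eq_iff_iff]
  simp
  try tauto

lemma hits_reactor (source : String) (annotations : List String) :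
    PySem.Set.contains (pvHits source annotations) "reactor"
    = (PySem.Str.isIn "reactor.core" source
        || (["Mono<", "Flux<"].any fun token => PySem.Str.isIn token source)) := by
  unfold pvHits pvSubPairs
  rw [contains_subFold, contains_annoFold, anno_reactor]
  rw [Bool.eq_iff_iff]
  simp
  try tauto

-- ===== VERDICT (by name: the statement is the Claim_ definition above) =====
theorem detect_frameworks_py_spec : Claim_equal_detect_frameworks_py := by
  intro source annotations _
  unfold Spec_detect_frameworks_py detect_frameworks_py detect_frameworks_py_alt
  simp only [pvOrder, List.filter_cons, List.filter_nil,
             hits_spring, hits_jpa, hits_mybatis, hits_lombok, hits_reactor]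
  generalize ((!(PySem.Set.inter (PySem.Set.ofList ["SpringBootApplication", "Service", "Repository", "RestController", "Autowired"]) annotations).isEmpty) || PySem.Str.isIn "org.springframework" source) = b1
  generalize (PySem.Str.isIn "javax.persistence" source || PySem.Str.isIn "jakarta.persistence" source || PySem.Set.contains annotations "Entity") = b2
  generalize (PySem.Set.contains annotations "Mapper" || PySem.Str.isIn "org.apache.ibatis" source) = b3
  generalize (PySem.Str.isIn "lombok" source || (!(PySem.Set.inter annotations (PySem.Set.ofList ["Data", "Builder", "Value"])).isEmpty)) = b4
  generalize (PySem.Str.isIn "reactor.core" source || (["Mono<", "Flux<"].any fun token => PySem.Str.isIn token source)) = b5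
  revert b1 b2 b3 b4 b5
  decide
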